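-- pv_equiv track=rewrite | github.com/ssiumha/dots | prompts/skills/dep-graph/scripts/build-graph.py | apply_depth_limit
-- ===== SOURCE A (Python) =====
-- from collections import defaultdict
--
-- def apply_depth_limit(
--     edges: list[dict], scope_ids: set[str], depth: int,
-- ) -> list[dict]:
--     if depth <= 0:
--         return edges
--
--     adj: dict[str, list[str]] = defaultdict(list)
--     for e in edges:
--         adj[e["from"]].append(e["to"])
--
--     reachable = set(scope_ids)
--     frontier = set(scope_ids)
--     for _ in range(depth):
--         nxt: set[str] = set()
--         for node in frontier:
--             for nb in adj.get(node, []):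
--                 if nb not in reachable:
--                     reachable.add(nb)
--                     nxt.add(nb)
--         frontier = nxt
--         if not frontier:
--             break
--
--     return [e for e in edges if e["from"] in reachable and e["to"] in reachable]
-- ===== SOURCE B (Python) =====
-- def apply_depth_limit(
--     edges: list[dict], scope_ids: set[str], depth: int,
-- ) -> list[dict]:
--     if depth <= 0:
--         return edges
--
--     reachable = set(scope_ids)
--     for _ in range(depth):
--         new = {e["to"] for e in edges if e["from"] in reachable} - reachable
--         if not new:
--             break
--         reachable |= new
--
--     return [e for e in edges if e["from"] in reachable and e["to"] in reachable]
-- ===== Notes on version B (the rewrite author's own statement) =====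
-- stated objective: simpler
-- what changed: Replaces the adjacency-dict build plus frontier/next-level set bookkeeping with repeated whole-set relaxation rounds directly over the edge list: each round adds every 'to' endpoint of an edge whose 'from' endpoint is already reachable, stopping when a round adds nothing.
import Mathlib
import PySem

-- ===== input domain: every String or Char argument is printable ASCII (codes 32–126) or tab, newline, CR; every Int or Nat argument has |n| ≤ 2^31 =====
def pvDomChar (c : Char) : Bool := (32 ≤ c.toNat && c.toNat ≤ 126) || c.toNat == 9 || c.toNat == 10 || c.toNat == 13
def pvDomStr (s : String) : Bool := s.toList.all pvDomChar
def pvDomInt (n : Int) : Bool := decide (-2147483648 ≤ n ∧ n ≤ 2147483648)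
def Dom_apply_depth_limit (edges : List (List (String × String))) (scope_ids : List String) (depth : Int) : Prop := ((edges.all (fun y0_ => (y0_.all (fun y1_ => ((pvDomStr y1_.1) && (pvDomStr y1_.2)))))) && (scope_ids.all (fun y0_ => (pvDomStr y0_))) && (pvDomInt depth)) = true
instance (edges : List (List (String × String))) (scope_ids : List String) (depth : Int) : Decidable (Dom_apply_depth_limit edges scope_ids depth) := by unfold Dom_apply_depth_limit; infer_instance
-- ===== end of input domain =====

-- B replaces A's adjacency-dict + frontier/next-level bookkeeping by repeated whole-set
-- relaxation rounds straight over the edge list (objective: simpler, not faster).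

-- shared primitive: e["k"] on an edge dict (inputs where the key is missing — Python
-- KeyError — are excluded by Pre_; the "" default is never reached inside Pre_)
def dget (e : List (String × String)) (k : String) : String :=
  (PySem.Dict.ofList e).getD k ""

-- ===== PORT A =====
def adjBuild (edges : List (List (String × String))) : PySem.Dict String (List String) :=
  edges.foldl (fun d e => d.modify (dget e "from") [] (· ++ [dget e "to"])) PySem.Dict.empty

def loopA (adj : PySem.Dict String (List String)) (reachable frontier : PySem.Set String) :
    Nat → PySem.Set String
  | 0 => reachable
  | k + 1 =>
      let rn := frontier.foldl
        (fun rn node =>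
          (adj.getD node []).foldl
            (fun rn nb =>
              if nb ∈ rn.1 then rn else (PySem.Set.add rn.1 nb, PySem.Set.add rn.2 nb))
            rn)
        (reachable, (PySem.Set.empty : PySem.Set String))
      if rn.2.isEmpty then rn.1 else loopA adj rn.1 rn.2 k

def apply_depth_limit (edges : List (List (String × String))) (scope_ids : List String) (depth : Int) : List (List (String × String)) :=
  if depth ≤ 0 then edges
  else
    let adj := adjBuild edges
    let reachable := loopA adj (PySem.Set.ofList scope_ids) (PySem.Set.ofList scope_ids) depth.toNat
    edges.filter (fun e => decide (dget e "from" ∈ reachable) && decide (dget e "to" ∈ reachable))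

-- ===== PORT B =====
def loopB (edges : List (List (String × String))) (reachable : PySem.Set String) :
    Nat → PySem.Set String
  | 0 => reachable
  | k + 1 =>
      let nw := PySem.Set.diff
        (PySem.Set.ofList ((edges.filter (fun e => decide (dget e "from" ∈ reachable))).map (fun e => dget e "to")))
        reachable
      if nw.isEmpty then reachable else loopB edges (PySem.Set.union reachable nw) k

def apply_depth_limit_alt (edges : List (List (String × String))) (scope_ids : List String) (depth : Int) : List (List (String × String)) :=
  if depth ≤ 0 then edges
  else
    let reachable := loopB edges (PySem.Set.ofList scope_ids) depth.toNat
    edges.filter (fun e => decide (dget e "from" ∈ reachable) && decide (dget e "to" ∈ reachable))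

-- ===== PRECONDITION & SPEC =====
-- Pre_ excludes exactly the inputs where Python A raises KeyError: depth > 0 and some
-- edge dict lacks the "from" or "to" key.
def Pre_apply_depth_limit (edges : List (List (String × String))) (scope_ids : List String) (depth : Int) : Prop :=
  depth ≤ 0 ∨ ∀ e ∈ edges, (PySem.Dict.ofList e).contains "from" = true ∧ (PySem.Dict.ofList e).contains "to" = true
instance (edges : List (List (String × String))) (scope_ids : List String) (depth : Int) : Decidable (Pre_apply_depth_limit edges scope_ids depth) := by unfold Pre_apply_depth_limit; infer_instance

def pvWitness_apply_depth_limit : (List (List (String × String))) × List String × Int :=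
  ([[("from", "a"), ("to", "b")], [("from", "b"), ("to", "c")]], ["a"], 1)

def Spec_apply_depth_limit (edges : List (List (String × String))) (scope_ids : List String) (depth : Int) (out : List (List (String × String))) : Prop := out = apply_depth_limit_alt edges scope_ids depth
instance (edges : List (List (String × String))) (scope_ids : List String) (depth : Int) (out : List (List (String × String))) : Decidable (Spec_apply_depth_limit edges scope_ids depth out) := by unfold Spec_apply_depth_limit; infer_instance

-- ===== CLAIM (what is proved, stated in full; the proofs are below) =====
def Claim_equal_apply_depth_limit : Prop := ∀ (edges : List (List (String × String))) (scope_ids : List String) (depth : Int), Dom_apply_depth_limit edges scope_ids depth → Pre_apply_depth_limit edges scope_ids depth → Spec_apply_depth_limit edges scope_ids depth (apply_depth_limit edges scope_ids depth)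

-- ===== LEMMAS AND PROOFS =====

-- membership in the adjacency lists A builds
theorem mem_adjBuild (edges : List (List (String × String))) (n x : String) :
    x ∈ (adjBuild edges).getD n [] ↔ ∃ e ∈ edges, dget e "from" = n ∧ dget e "to" = x := by
  have h : adjBuild edges
      = (edges.map (fun e => (dget e "from", dget e "to"))).foldl
          (fun d p => d.modify p.1 [] (· ++ [p.2])) PySem.Dict.empty := by
    rw [List.foldl_map]; rfl
  rw [h, PySem.Dict.getD_foldl_modify_append]
  simp only [PySem.Dict.getD_empty, List.nil_append]
  constructor
  · intro hx
    rcases List.mem_map.1 hx with ⟨p, hp, rfl⟩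
    rcases List.mem_filter.1 hp with ⟨hpm, hpn⟩
    rcases List.mem_map.1 hpm with ⟨e, he, rfl⟩
    exact ⟨e, he, by simpa using hpn, rfl⟩
  · rintro ⟨e, he, h1, h2⟩
    exact List.mem_map.2 ⟨(dget e "from", dget e "to"),
      List.mem_filter.2 ⟨List.mem_map.2 ⟨e, he, rfl⟩, by simpa using h1⟩, h2⟩

-- inner fold of A's round: visiting one adjacency list
theorem loopA_inner (as : List String) :
    ∀ rn : PySem.Set String × PySem.Set String,
    (∀ x, x ∈ (as.foldl
        (fun rn nb => if nb ∈ rn.1 then rn else (PySem.Set.add rn.1 nb, PySem.Set.add rn.2 nb))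
        rn).1 ↔ x ∈ rn.1 ∨ x ∈ as) ∧
    (∀ x, x ∈ (as.foldl
        (fun rn nb => if nb ∈ rn.1 then rn else (PySem.Set.add rn.1 nb, PySem.Set.add rn.2 nb))
        rn).2 ↔ x ∈ rn.2 ∨ (x ∈ as ∧ x ∉ rn.1)) := by
  induction as with
  | nil => intro rn; simp
  | cons a as ih =>
    intro rn
    simp only [List.foldl_cons]
    by_cases ha : a ∈ rn.1
    · rw [if_pos ha]
      refine ⟨fun x => ?_, fun x => ?_⟩
      · rw [(ih rn).1, List.mem_cons]
        constructor
        · tauto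
        · rintro (h | rfl | h) <;> tauto
      · rw [(ih rn).2, List.mem_cons]
        constructor
        · tauto
        · rintro (h | ⟨(rfl | h), hr⟩) <;> tauto
    · rw [if_neg ha]
      refine ⟨fun x => ?_, fun x => ?_⟩
      · rw [(ih _).1]
        simp only [PySem.Set.mem_add, List.mem_cons]
        tauto
      · rw [(ih _).2]
        simp only [PySem.Set.mem_add, List.mem_cons]
        constructor
        · rintro ((h | rfl) | ⟨h, hr⟩) <;> tauto
        · rintro (h | ⟨(rfl | h), hr⟩) <;> tauto

-- outer fold of A's round: visiting the whole frontier
theorem loopA_round (adj : PySem.Dict String (List String)) (fs : List String) :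
    ∀ rn : PySem.Set String × PySem.Set String,
    (∀ x, x ∈ (fs.foldl
        (fun rn node =>
          (adj.getD node []).foldl
            (fun rn nb => if nb ∈ rn.1 then rn else (PySem.Set.add rn.1 nb, PySem.Set.add rn.2 nb))
            rn) rn).1 ↔ x ∈ rn.1 ∨ ∃ n ∈ fs, x ∈ adj.getD n []) ∧
    (∀ x, x ∈ (fs.foldl
        (fun rn node =>
          (adj.getD node []).foldl
            (fun rn nb => if nb ∈ rn.1 then rn else (PySem.Set.add rn.1 nb, PySem.Set.add rn.2 nb))
            rn) rn).2 ↔ x ∈ rn.2 ∨ ∃ n ∈ fs, x ∈ adj.getD n [] ∧ x ∉ rn.1) := by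
  induction fs with
  | nil => intro rn; simp
  | cons f fs ih =>
    intro rn
    simp only [List.foldl_cons]
    have hin := loopA_inner (adj.getD f []) rn
    refine ⟨fun x => ?_, fun x => ?_⟩
    · rw [(ih _).1, hin.1]
      simp only [List.exists_mem_cons_iff]
      tauto
    · rw [(ih _).2, hin.2]
      simp only [List.exists_mem_cons_iff]
      constructor
      · rintro ((h | ⟨hf, hr⟩) | ⟨n, hn, hx, hnr⟩)
        · tauto
        · tauto
        · rw [hin.1] at hnr
          exact Or.inr (Or.inr ⟨n, hn, hx, fun h => hnr (Or.inl h)⟩)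
      · rintro (h | ⟨hf, hr⟩ | ⟨n, hn, hx, hnr⟩)
        · tauto
        · tauto
        · by_cases hxf : x ∈ adj.getD f []
          · tauto
          · refine Or.inr ⟨n, hn, hx, ?_⟩
            rw [hin.1]
            rintro (h | h) <;> tauto

-- the two reachability loops compute the same set of nodes
theorem loop_eq (edges : List (List (String × String))) (k : Nat) :
    ∀ (rA fA rB : PySem.Set String),
    (∀ x, x ∈ rA ↔ x ∈ rB) →
    (∀ x, x ∈ fA → x ∈ rA) →
    (∀ e ∈ edges, dget e "from" ∈ rA → dget e "from" ∈ fA ∨ dget e "to" ∈ rA) →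
    ∀ x, x ∈ loopA (adjBuild edges) rA fA k ↔ x ∈ loopB edges rB k := by
  induction k with
  | zero => intro rA fA rB h1 _ _ x; simpa [loopA, loopB] using h1 x
  | succ k ih =>
    intro rA fA rB h1 h2 h3
    simp only [loopA, loopB]
    have hround := loopA_round (adjBuild edges) fA (rA, (PySem.Set.empty : PySem.Set String))
    -- the frontier-neighbour set, written over the edge list
    have hNf : ∀ x, (∃ n ∈ fA, x ∈ (adjBuild edges).getD n []) ↔
        (∃ e ∈ edges, dget e "from" ∈ fA ∧ dget e "to" = x) := by
      intro x
      constructor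
      · rintro ⟨n, hn, hx⟩
        rcases (mem_adjBuild edges n x).1 hx with ⟨e, he, hf, ht⟩
        exact ⟨e, he, hf ▸ hn, ht⟩
      · rintro ⟨e, he, hf, ht⟩
        exact ⟨dget e "from", hf, (mem_adjBuild edges _ x).2 ⟨e, he, rfl, ht⟩⟩
    set rn := fA.foldl
        (fun rn node =>
          ((adjBuild edges).getD node []).foldl
            (fun rn nb => if nb ∈ rn.1 then rn else (PySem.Set.add rn.1 nb, PySem.Set.add rn.2 nb))
            rn) (rA, (PySem.Set.empty : PySem.Set String)) with hrn
    set nw := PySem.Set.diff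
        (PySem.Set.ofList ((edges.filter (fun e => decide (dget e "from" ∈ rB))).map (fun e => dget e "to")))
        rB with hnw
    have hnwmem : ∀ x, x ∈ nw ↔
        (∃ e ∈ edges, dget e "from" ∈ rB ∧ dget e "to" = x) ∧ x ∉ rB := by
      intro x
      rw [hnw, PySem.Set.mem_diff, PySem.Set.mem_ofList]
      simp only [List.mem_map, List.mem_filter, decide_eq_true_eq]
      constructor
      · rintro ⟨⟨e, ⟨he, hf⟩, ht⟩, hr⟩
        exact ⟨⟨e, he, hf, ht⟩, hr⟩
      · rintro ⟨⟨e, he, hf, ht⟩, hr⟩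
        exact ⟨⟨e, ⟨he, hf⟩, ht⟩, hr⟩
    have hrn2 : ∀ x, x ∈ rn.2 ↔
        ((∃ e ∈ edges, dget e "from" ∈ fA ∧ dget e "to" = x) ∧ x ∉ rA) := by
      intro x
      rw [hround.2 x]
      simp only [PySem.Set.empty, List.not_mem_nil, false_or]
      constructor
      · rintro ⟨n, hn, hx, hr⟩
        exact ⟨(hNf x).1 ⟨n, hn, hx⟩, hr⟩
      · rintro ⟨hN, hr⟩
        rcases (hNf x).2 hN with ⟨n, hn, hx⟩
        exact ⟨n, hn, hx, hr⟩
    -- the newly discovered nodes agree on both sides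
    have hkey : ∀ x, x ∈ rn.2 ↔ x ∈ nw := by
      intro x
      rw [hrn2 x, hnwmem x]
      constructor
      · rintro ⟨⟨e, he, hf, ht⟩, hr⟩
        exact ⟨⟨e, he, (h1 _).1 (h2 _ hf), ht⟩, fun h => hr ((h1 x).2 h)⟩
      · rintro ⟨⟨e, he, hf, ht⟩, hr⟩
        rcases h3 e he ((h1 _).2 hf) with hff | htr
        · exact ⟨⟨e, he, hff, ht⟩, fun h => hr ((h1 x).1 h)⟩
        · exact absurd ((h1 _).1 (ht ▸ htr)) hr
    -- and so do the post-round reachable sets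
    have hr1 : ∀ x, x ∈ rn.1 ↔ x ∈ PySem.Set.union rB nw := by
      intro x
      rw [hround.1 x, PySem.Set.mem_union, hnwmem x]
      constructor
      · rintro (h | h)
        · exact Or.inl ((h1 x).1 h)
        · rcases (hNf x).1 h with ⟨e, he, hf, ht⟩
          by_cases hx : x ∈ rB
          · exact Or.inl hx
          · exact Or.inr ⟨⟨e, he, (h1 _).1 (h2 _ hf), ht⟩, hx⟩
      · rintro (h | ⟨⟨e, he, hf, ht⟩, hr⟩)
        · exact Or.inl ((h1 x).2 h)
        · rcases h3 e he ((h1 _).2 hf) with hff | htr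
          · exact Or.inr ((hNf x).2 ⟨e, he, hff, ht⟩)
          · exact absurd ((h1 _).1 (ht ▸ htr)) hr
    have hempiff : rn.2 = ([] : List String) ↔ nw = ([] : List String) := by
      simp only [List.eq_nil_iff_forall_not_mem]
      exact ⟨fun h x hx => h x ((hkey x).2 hx), fun h x hx => h x ((hkey x).1 hx)⟩
    by_cases hemp : nw = ([] : List String)
    · rw [if_pos (by simp [hempiff.2 hemp]), if_pos (by simp [hemp])]
      intro x
      rw [hr1 x, PySem.Set.mem_union, hemp]
      simp
    · have hA : rn.2.isEmpty = false := by
        rcases List.exists_mem_of_ne_nil _ (fun h => hemp (hempiff.1 h)) with ⟨y, hy⟩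
        cases hz : rn.2 with
        | nil => rw [hz] at hy; cases hy
        | cons _ _ => simp
      rw [hA, if_neg (by simp), if_neg (by simp [List.isEmpty_iff, hemp])]
      exact ih rn.1 rn.2 (PySem.Set.union rB nw) hr1
        (fun x hx => by
          rw [hr1 x, PySem.Set.mem_union]
          exact Or.inr ((hkey x).1 hx))
        (fun e he hf => by
          rw [hr1 _, PySem.Set.mem_union] at hf
          rcases hf with hf | hf
          · rcases h3 e he ((h1 _).2 hf) with hff | htr
            · refine Or.inr ?_
              rw [hround.1]
              exact Or.inr ((hNf _).2 ⟨e, he, hff, rfl⟩)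
            · refine Or.inr ?_
              rw [hround.1]
              exact Or.inl htr
          · exact Or.inl ((hkey _).2 hf))

-- ===== VERDICT (by name: the statement is the Claim_ definition above) =====
theorem apply_depth_limit_spec : Claim_equal_apply_depth_limit := by
  intro edges scope_ids depth _ _
  unfold Spec_apply_depth_limit apply_depth_limit apply_depth_limit_alt
  by_cases hd : depth ≤ 0
  · rw [if_pos hd, if_pos hd]
  · rw [if_neg hd, if_neg hd]
    have h := loop_eq edges depth.toNat
      (PySem.Set.ofList scope_ids) (PySem.Set.ofList scope_ids) (PySem.Set.ofList scope_ids)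
      (fun x => Iff.rfl) (fun x hx => hx) (fun e _ hf => Or.inl hf)
    exact (List.filter_congr (fun e _ => by simp only [h])).symm
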